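-- pv_equiv track=rewrite | github.com/Duelun/experiment1_process | database2.py | checkNewFunc
-- ===== SOURCE A (Python) =====
-- def checkNewFunc(obj, func, info='', checkinfo=False):
--     numL = []
--     flag = False
--     if len(obj['newFunc']) == 0:
--         num = '1'
--     else:
--         for n in obj['newFunc']:
--             if checkinfo:
--                 if obj['newFunc'][n]['info'] == info:
--                     flag = True
--                     break
--             numL.append(int(n))
--         if flag:
--             num = str(n)
--         else:
--             num = str(max(numL)+1)
--     obj['newFunc'][num] = {}
--     obj['newFunc'][num]['name'] = func
--     obj['newFunc'][num]['info'] = info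
--     return(num)
-- ===== SOURCE B (Python) =====
-- def checkNewFunc(obj, func, info='', checkinfo=False):
--     d = obj['newFunc']
--     num = None
--     if checkinfo:
--         # reverse index info -> key, built back-to-front so the FIRST key wins
--         byinfo = {d[n].get('info'): n for n in reversed(list(d))}
--         num = byinfo.get(info)
--     if num is None:
--         ids = sorted(int(n) for n in d)
--         num = str(ids[-1] + 1) if ids else '1'
--     d[num] = {'name': func, 'info': info}
--     return num
-- ===== Notes on version B (the rewrite author's own statement) =====
-- stated objective: alternative
-- what changed: A's single interleaved break-loop (flag + int accumulator, then max) is replaced by a reverse hash index info->key built once over the keys in reverse so the first matching key wins (no scan with break, no flag), and allocation by sorting the int keys and taking the last element + 1 instead of max over an accumulated list.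
import Mathlib
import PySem

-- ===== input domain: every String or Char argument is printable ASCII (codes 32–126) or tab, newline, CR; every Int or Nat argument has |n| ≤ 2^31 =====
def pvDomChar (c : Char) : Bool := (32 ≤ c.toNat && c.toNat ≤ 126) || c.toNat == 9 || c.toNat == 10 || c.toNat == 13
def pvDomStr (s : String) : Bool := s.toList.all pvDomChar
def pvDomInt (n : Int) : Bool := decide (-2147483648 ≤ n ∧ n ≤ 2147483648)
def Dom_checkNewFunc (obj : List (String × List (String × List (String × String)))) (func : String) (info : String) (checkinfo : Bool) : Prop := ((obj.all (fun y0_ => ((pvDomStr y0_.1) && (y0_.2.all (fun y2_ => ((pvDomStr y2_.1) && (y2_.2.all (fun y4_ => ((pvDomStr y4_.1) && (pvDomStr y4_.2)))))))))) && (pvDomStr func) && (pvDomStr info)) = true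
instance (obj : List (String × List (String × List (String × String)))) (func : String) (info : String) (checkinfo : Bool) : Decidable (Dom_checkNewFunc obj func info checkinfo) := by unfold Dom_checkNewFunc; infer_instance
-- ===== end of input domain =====

-- B replaces A's interleaved break-loop by a reverse hash index info->key (built once, in
-- reverse so the first key wins) plus allocation by sorting the int keys and taking the last
-- (objective: alternative). Both Pythons mutate obj the same way; the equivalence proved here
-- is about the return value.

-- ===== PORT A =====
-- int(n), with a default; Pre_ guarantees the parse succeeds wherever A evaluates it
def pvIntOf (s : String) : Int := (PySem.Int.ofStr? s).getD 0
-- obj['newFunc'][n]['info'], with defaults; Pre_ guarantees the lookups A performs succeed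
def pvInfoOf (d : List (String × List (String × String))) (n : String) : String :=
  (List.lookup "info" ((List.lookup n d).getD [])).getD ""

-- A's loop: state = (numL, flag/break key); returns (matched key?, numL at exit)
def checkNewFuncLoopA (d : List (String × List (String × String))) (info : String)
    (checkinfo : Bool) : List String → List Int → Option String × List Int
  | [], numL => (none, numL)
  | n :: rest, numL =>
    if checkinfo && (pvInfoOf d n == info) then (some n, numL)
    else checkNewFuncLoopA d info checkinfo rest (numL ++ [pvIntOf n])

def checkNewFunc (obj : List (String × List (String × List (String × String)))) (func : String) (info : String) (checkinfo : Bool) : String :=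
  let d := (List.lookup "newFunc" obj).getD []
  if d.length == 0 then "1"
  else
    match checkNewFuncLoopA d info checkinfo (d.map (·.1)) [] with
    | (some n, _) => n                                   -- str(n) of a string key is the key
    | (none, numL) => PySem.Int.toStr ((PySem.List.max? numL (fun x => x)).getD 0 + 1)

-- ===== PORT B =====
-- d[n].get('info')  (B uses .get, which returns None instead of raising)
def pvInfoGet (d : List (String × List (String × String))) (n : String) : Option String :=
  List.lookup "info" ((List.lookup n d).getD [])

def checkNewFunc_alt (obj : List (String × List (String × List (String × String)))) (func : String) (info : String) (checkinfo : Bool) : String :=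
  let d := (List.lookup "newFunc" obj).getD []
  let keys := d.map (·.1)
  let num : Option String :=
    if checkinfo then
      -- byinfo = {d[n].get('info'): n for n in reversed(list(d))}; byinfo.get(info)
      let byinfo : PySem.Dict (Option String) String :=
        keys.reverse.foldl (fun acc n => acc.insert (pvInfoGet d n) n) PySem.Dict.empty
      byinfo.get? (some info)
    else none
  match num with
  | some n => n
  | none =>
    let ids := PySem.List.sorted (keys.map pvIntOf) (fun x => x)
    if ids.isEmpty then "1"
    else PySem.Int.toStr ((PySem.List.pyGet? ids (-1)).getD 0 + 1)

-- ===== PRECONDITION & SPEC =====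
-- key n matches: obj['newFunc'][n]['info'] exists and equals info
def pvMatchKey (d : List (String × List (String × String))) (info : String) (n : String) : Bool :=
  List.lookup "info" ((List.lookup n d).getD []) == some info
-- Exactly where Python A returns: obj has key 'newFunc'; with checkinfo, every key A scans
-- before breaking (the prefix of non-matching keys) has an 'info' field and parses as int;
-- without checkinfo, every key parses as int.
def Pre_checkNewFunc (obj : List (String × List (String × List (String × String)))) (func : String) (info : String) (checkinfo : Bool) : Prop :=
  (List.lookup "newFunc" obj).isSome = true ∧
  (let d := (List.lookup "newFunc" obj).getD []
   let keys := d.map (·.1)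
   if checkinfo then
     ∀ n ∈ keys.takeWhile (fun n => !(pvMatchKey d info n)),
       (List.lookup "info" ((List.lookup n d).getD [])).isSome = true ∧ (PySem.Int.ofStr? n).isSome = true
   else ∀ n ∈ keys, (PySem.Int.ofStr? n).isSome = true)
instance (obj : List (String × List (String × List (String × String)))) (func : String) (info : String) (checkinfo : Bool) : Decidable (Pre_checkNewFunc obj func info checkinfo) := by unfold Pre_checkNewFunc; infer_instance

def pvWitness_checkNewFunc : (List (String × List (String × List (String × String)))) × String × String × Bool :=
  ([("newFunc", [("1", [("name", "f"), ("info", "x")])])], "g", "y", true)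

def Spec_checkNewFunc (obj : List (String × List (String × List (String × String)))) (func : String) (info : String) (checkinfo : Bool) (out : String) : Prop := out = checkNewFunc_alt obj func info checkinfo
instance (obj : List (String × List (String × List (String × String)))) (func : String) (info : String) (checkinfo : Bool) (out : String) : Decidable (Spec_checkNewFunc obj func info checkinfo out) := by unfold Spec_checkNewFunc; infer_instance

-- ===== CLAIM (what is proved, stated in full; the proofs are below) =====
def Claim_equal_checkNewFunc : Prop := ∀ (obj : List (String × List (String × List (String × String)))) (func : String) (info : String) (checkinfo : Bool), Dom_checkNewFunc obj func info checkinfo → Pre_checkNewFunc obj func info checkinfo → Spec_checkNewFunc obj func info checkinfo (checkNewFunc obj func info checkinfo)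

-- ===== LEMMAS AND PROOFS =====

-- A's loop returns the first key satisfying the (checkinfo-guarded) match predicate,
-- together with acc extended by the ints of the scanned non-matching prefix.
theorem checkNewFuncLoopA_eq (d : List (String × List (String × String))) (info : String)
    (checkinfo : Bool) (keys : List String) (acc : List Int) :
    checkNewFuncLoopA d info checkinfo keys acc =
      (keys.find? (fun n => checkinfo && (pvInfoOf d n == info)),
       acc ++ (keys.takeWhile (fun n => !(checkinfo && (pvInfoOf d n == info)))).map pvIntOf) := by
  induction keys generalizing acc with
  | nil => simp [checkNewFuncLoopA]
  | cons n rest ih =>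
    by_cases h : (checkinfo && (pvInfoOf d n == info)) = true
    · simp [checkNewFuncLoopA, h, List.find?, List.takeWhile]
    · simp only [Bool.not_eq_true] at h
      simp [checkNewFuncLoopA, h, ih, List.find?, List.takeWhile]

-- B's reverse-index build: lookup in the fold-of-inserts = find-first over the original order
theorem dictFold_get? (d : List (String × List (String × String)))
    (l : List String) (acc : PySem.Dict (Option String) String) (k : Option String) :
    (l.foldl (fun a n => a.insert (pvInfoGet d n) n) acc).get? k =
      (match l.reverse.find? (fun n => pvInfoGet d n == k) with
       | some n => some n
       | none => acc.get? k) := by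
  induction l generalizing acc with
  | nil => simp
  | cons n rest ih =>
    simp only [List.foldl_cons, ih, List.reverse_cons, List.find?_append]
    cases hf : rest.reverse.find? (fun n => pvInfoGet d n == k) with
    | some m => simp
    | none =>
      by_cases h : pvInfoGet d n = k
      · simp [List.find?, h, PySem.Dict.get?_insert_self]
      · have : (pvInfoGet d n == k) = false := by simpa using h
        simp [List.find?, this, PySem.Dict.get?_insert_of_ne _ _ (Ne.symm h)]

-- find-first is the same under the strict predicate (A reads d[n]['info']) and the total one
-- (B reads d[n].get('info')), given Pre_'s guarantee on the non-matching prefix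
theorem find?_congr_prefix (p q : String → Bool) (l : List String)
    (hpre : ∀ n ∈ l.takeWhile (fun n => !(q n)), p n = q n)
    (himp : ∀ n, q n = true → p n = true) :
    l.find? p = l.find? q := by
  induction l with
  | nil => rfl
  | cons n rest ih =>
    by_cases hq : q n = true
    · simp [List.find?, hq, himp n hq]
    · have hq' : q n = false := by simpa using hq
      have hpn : p n = q n := hpre n (by simp [List.takeWhile, hq'])
      rw [List.find?_cons, List.find?_cons, hpn, hq']
      exact ih (fun m hm => hpre m (by simp [List.takeWhile, hq', hm]))

-- last element of sorted(xs) (as a value) = max(xs), for nonempty xs of Ints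
theorem getLast?_sorted_eq_max? (xs : List Int) (hne : xs ≠ []) :
    (PySem.List.sorted xs (fun x => x) false).getLast? =
      PySem.List.max? xs (fun x => x) := by
  have hperm := PySem.List.sorted_perm xs (fun x => x) false
  have hsne : PySem.List.sorted xs (fun x => x) false ≠ [] := by
    intro h; rw [h] at hperm; exact hne hperm.symm.eq_nil
  obtain ⟨m, hm⟩ := Option.isSome_iff_exists.mp (by
    rw [Option.isSome_iff_ne_none]
    intro h
    exact hne ((PySem.List.max?_eq_none_iff xs (fun x => x)).mp h))
  rw [hm]
  set s := PySem.List.sorted xs (fun x => x) false with hs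
  have hg : s.getLast? = some (s.getLast hsne) := List.getLast?_eq_some_getLast hsne
  rw [hg]
  congr 1
  have hglast : s.getLast hsne = s[s.length - 1]'(by have := List.length_pos_iff.mpr hsne; omega) :=
    List.getLast_eq_getElem hsne
  have hgmem : s.getLast hsne ∈ xs := hperm.mem_iff.mp (List.getLast_mem hsne)
  have hle : s.getLast hsne ≤ m := PySem.List.max?_isMax hm _ hgmem
  have hmem : m ∈ s := hperm.mem_iff.mpr (PySem.List.max?_mem hm)
  obtain ⟨p, hp, hpe⟩ := List.mem_iff_getElem.mp hmem
  have hlen : 0 < s.length := List.length_pos_iff.mpr hsne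
  have hge : m ≤ s.getLast hsne := by
    rw [hglast, ← hpe]
    have hps : p < s.length := hp
    exact PySem.List.sorted_id_getElem_mono xs
      (show p ≤ s.length - 1 by omega) (show s.length - 1 < s.length by omega)
  omega

-- the shared allocation value: A's max-over-accumulated-ints = B's sorted-last
theorem alloc_eq (xs : List Int) (hne : xs ≠ []) :
    PySem.Int.toStr ((PySem.List.max? xs (fun x => x)).getD 0 + 1) =
      (if (PySem.List.sorted xs (fun x => x) false).isEmpty then "1"
       else PySem.Int.toStr
         ((PySem.List.pyGet? (PySem.List.sorted xs (fun x => x) false) (-1)).getD 0 + 1)) := by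
  have hsne : (PySem.List.sorted xs (fun x => x) false) ≠ [] := by
    intro h; exact hne ((PySem.List.sorted_eq_nil_iff _ _ _).mp h)
  rw [if_neg (by simpa [List.isEmpty_iff] using hsne)]
  rw [PySem.List.pyGet?_neg_one, getLast?_sorted_eq_max? xs hne]

theorem checkNewFunc_eq_alt (obj : List (String × List (String × List (String × String)))) (func : String) (info : String) (checkinfo : Bool)
    (hpre : Pre_checkNewFunc obj func info checkinfo) :
    checkNewFunc obj func info checkinfo = checkNewFunc_alt obj func info checkinfo := by
  obtain ⟨-, hrest⟩ := hpre
  unfold checkNewFunc checkNewFunc_alt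
  simp only [checkNewFuncLoopA_eq, dictFold_get?, List.reverse_reverse,
    PySem.Dict.get?_empty] at *
  set d := (List.lookup "newFunc" obj).getD [] with hd
  by_cases hempty : d = []
  · simp [hempty, PySem.List.sorted]
  · have hlen : (d.length == 0) = false := by simp [List.length_eq_zero_iff, hempty]
    have hkne : d.map (·.1) ≠ [] := by simpa using hempty
    have hine : (d.map (·.1)).map pvIntOf ≠ [] := by simpa using hkne
    rw [hlen]
    simp only [Bool.false_eq_true, if_false]
    cases hci : checkinfo with
    | false =>
      simp only [hci, Bool.false_and] at *
      have h1 : (d.map (·.1)).find? (fun _ => false) = none := by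
        rw [List.find?_eq_none]; intro x _; simp
      have h2 : (d.map (·.1)).takeWhile (fun _ => true) = d.map (·.1) := by
        rw [List.takeWhile_eq_self_iff]; intro x _; rfl
      simp only [h1, h2, List.nil_append, Bool.not_false]
      exact alloc_eq _ hine
    | true =>
      simp only [hci, if_true, Bool.true_and] at *
      -- A's strict predicate agrees with B's total one under Pre_
      have hfind : (d.map (·.1)).find? (fun n => pvInfoOf d n == info) =
          (d.map (·.1)).find? (fun n => pvInfoGet d n == some info) := by
        apply find?_congr_prefix
        · intro n hn
          have hn' : n ∈ (d.map (·.1)).takeWhile (fun n => !(pvMatchKey d info n)) := by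
            simpa [pvMatchKey, pvInfoGet] using hn
          obtain ⟨hsome, -⟩ := hrest n hn'
          obtain ⟨v, hv⟩ := Option.isSome_iff_exists.mp hsome
          simp [pvInfoOf, pvInfoGet, hv]
        · intro n hq
          have : pvInfoGet d n = some info := by simpa using hq
          simp [pvInfoOf, pvInfoGet] at this ⊢
          simp [this]
      rw [hfind]
      cases hf : (d.map (·.1)).find? (fun n => pvInfoGet d n == some info) with
      | some n => simp
      | none =>
        have hall : ∀ n ∈ d.map (·.1), ¬ ((pvInfoGet d n == some info) = true) := by
          simpa [List.find?_eq_none] using hf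
        have htw : (d.map (·.1)).takeWhile (fun n => !(pvInfoOf d n == info)) = d.map (·.1) := by
          rw [← hfind] at hf
          have hall' : ∀ n ∈ d.map (·.1), ¬ ((pvInfoOf d n == info) = true) := by
            simpa [List.find?_eq_none] using hf
          apply List.takeWhile_eq_self_iff.mpr
          intro n hn; simpa using hall' n hn
        simp only [htw, List.nil_append]
        exact alloc_eq _ hine

-- ===== VERDICT (by name: the statement is the Claim_ definition above) =====
theorem checkNewFunc_spec : Claim_equal_checkNewFunc := by
  intro obj func info checkinfo _ hpre
  exact checkNewFunc_eq_alt obj func info checkinfo hpre
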